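-- pv_equiv track=rewrite | github.com/manerao-pritam/Solutions-for-Programming-Street-150 | PS-Sprint-2/12.matrix_of_fib_nums.py | print_matrix_of_fib
-- ===== SOURCE A (Python) =====
-- def print_matrix_of_fib(num):
--     fibs = [0] * (num * num)
--     fibs[:2] = [1, 1]
--
--     for i in range(2, len(fibs)):
--         fibs[i] = fibs[i - 1] + fibs[i - 2]
--
--     write_idx = 0
--
--     grid = [[0 for _ in range(num)] for _ in range(num)]
--     for r in range(num):
--         for c in range(num):
--             grid[r][c] = fibs[write_idx]
--             write_idx += 1
--
--     return grid
-- ===== SOURCE B (Python) =====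
-- def print_matrix_of_fib(num):
--     a, b = 1, 1
--     grid = []
--     for _ in range(num):
--         row = []
--         for _ in range(num):
--             row.append(a)
--             a, b = b, a + b
--         grid.append(row)
--     return grid
-- ===== Notes on version B (the rewrite author's own statement) =====
-- stated objective: simpler
-- what changed: B drops A's precomputed flat fibs table, zero-filled grid and write_idx counter entirely and builds each row directly with two rolling Fibonacci variables advanced inline.
import Mathlib
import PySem

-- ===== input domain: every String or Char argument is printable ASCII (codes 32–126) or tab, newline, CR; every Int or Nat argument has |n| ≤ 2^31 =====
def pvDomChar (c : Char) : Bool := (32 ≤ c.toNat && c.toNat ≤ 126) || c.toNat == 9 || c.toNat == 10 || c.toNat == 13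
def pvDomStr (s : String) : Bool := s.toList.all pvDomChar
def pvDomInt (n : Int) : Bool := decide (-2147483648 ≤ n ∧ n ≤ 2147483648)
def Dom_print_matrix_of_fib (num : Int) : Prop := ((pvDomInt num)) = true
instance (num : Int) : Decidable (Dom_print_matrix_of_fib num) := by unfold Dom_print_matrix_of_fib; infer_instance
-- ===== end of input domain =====

-- B generates the Fibonacci numbers inline with two rolling variables while building the grid,
-- instead of A's precomputed flat table, zero grid and write index (objective: simpler).

-- ===== PORT A =====
def print_matrix_of_fib (num : Int) : List (List Int) :=
  -- fibs = [0] * (num * num)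
  let fibs0 : List Int := List.replicate (num * num).toNat 0
  -- fibs[:2] = [1, 1]   (slice assignment: the first two slots are replaced by [1, 1])
  let fibs1 : List Int := [1, 1] ++ fibs0.drop 2
  -- for i in range(2, len(fibs)): fibs[i] = fibs[i-1] + fibs[i-2]
  let fibs : List Int :=
    (PySem.List.pyRange 2 (fibs1.length : Int) 1).foldl
      (fun f i =>
        PySem.List.pySetD f i (PySem.List.pyGetD f (i - 1) 0 + PySem.List.pyGetD f (i - 2) 0)) fibs1
  -- grid = [[0 for _ in range(num)] for _ in range(num)]
  let grid0 : List (List Int) :=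
    (PySem.List.pyRange 0 num 1).map (fun _ => (PySem.List.pyRange 0 num 1).map (fun _ => (0 : Int)))
  -- for r in range(num): for c in range(num): grid[r][c] = fibs[write_idx]; write_idx += 1
  let res :=
    (PySem.List.pyRange 0 num 1).foldl
      (fun (s : List (List Int) × Int) r =>
        (PySem.List.pyRange 0 num 1).foldl
          (fun (t : List (List Int) × Int) c =>
            (PySem.List.pySetD t.1 r
              (PySem.List.pySetD (PySem.List.pyGetD t.1 r []) c (PySem.List.pyGetD fibs t.2 0)),
             t.2 + 1)) s) (grid0, (0 : Int))
  res.1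

-- ===== PORT B =====
def print_matrix_of_fib_alt (num : Int) : List (List Int) :=
  -- a, b = 1, 1; grid = []; nested 'for _ in range(num)' appending a and rolling a, b = b, a + b
  let s :=
    (PySem.List.pyRange 0 num 1).foldl
      (fun (s : List (List Int) × Int × Int) _ =>
        let t :=
          (PySem.List.pyRange 0 num 1).foldl
            (fun (t : List Int × Int × Int) _ =>
              (t.1 ++ [t.2.1], t.2.2, t.2.1 + t.2.2)) (([] : List Int), s.2)
        (s.1 ++ [t.1], t.2)) (([] : List (List Int)), (1 : Int), (1 : Int))
  s.1

-- ===== PRECONDITION & SPEC =====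
def Spec_print_matrix_of_fib (num : Int) (out : List (List Int)) : Prop := out = print_matrix_of_fib_alt num
instance (num : Int) (out : List (List Int)) : Decidable (Spec_print_matrix_of_fib num out) := by unfold Spec_print_matrix_of_fib; infer_instance

-- ===== CLAIM (what is proved, stated in full; the proofs are below) =====
def Claim_equal_print_matrix_of_fib : Prop := ∀ (num : Int), Dom_print_matrix_of_fib num → Spec_print_matrix_of_fib num (print_matrix_of_fib num)

-- ===== LEMMAS AND PROOFS =====

-- The Fibonacci sequence both programs produce (seeded 1, 1).

def fibP : Nat → Int
  | 0 => 1
  | 1 => 1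
  | n + 2 => fibP n + fibP (n + 1)

lemma fibP_rec (k : Nat) (h : 2 ≤ k) : fibP (k - 1) + fibP (k - 2) = fibP k := by
  obtain ⟨j, rfl⟩ := Nat.exists_eq_add_of_le h
  have h1 : 2 + j - 2 = j := by omega
  have h2 : 2 + j - 1 = j + 1 := by omega
  rw [h1, h2, Nat.add_comm 2 j, add_comm]
  rfl

lemma getD_set_self' {α : Type} (g : List α) (r : Nat) (X d : α) (h : r < g.length) :
    (g.set r X).getD r d = X := by
  rw [List.getD_eq_getElem _ _ (by simpa using h), List.getElem_set_self (by simpa using h)]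

lemma getD_set_ne' {α : Type} (g : List α) (r j : Nat) (X d : α) (h : r ≠ j) :
    (g.set r X).getD j d = g.getD j d := by
  simp [List.getD, List.getElem?_set_ne h]

-- A's first loop fills the flat table with Fibonacci numbers.
lemma fib_fill (L : Nat) : ∀ (t k : Nat) (f : List Int), 2 ≤ k → k + t = L → f.length = L →
    (∀ j, j < k → f.getD j 0 = fibP j) →
    (PySem.List.pyRange (k : Int) (L : Int) 1).foldl
      (fun f i =>
        PySem.List.pySetD f i (PySem.List.pyGetD f (i - 1) 0 + PySem.List.pyGetD f (i - 2) 0)) f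
    = (List.range L).map fibP := by
  intro t
  induction t with
  | zero =>
    intro k f hk hkt hlen hinv
    rw [PySem.List.pyRange_one_eq_nil (by omega)]
    simp only [List.foldl_nil]
    apply List.ext_getElem (by simpa using hlen)
    intro i h1 h2
    have hfi := hinv i (by omega)
    rw [List.getD_eq_getElem f 0 h1] at hfi
    simp [hfi]
  | succ t ih =>
    intro k f hk hkt hlen hinv
    rw [PySem.List.pyRange_one_cons (by omega), List.foldl_cons]
    have e1 : (k : Int) - 1 = ((k - 1 : Nat) : Int) := by omega
    have e2 : (k : Int) - 2 = ((k - 2 : Nat) : Int) := by omega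
    rw [e1, e2, PySem.List.pyGetD_natCast, PySem.List.pyGetD_natCast, PySem.List.pySetD_natCast]
    rw [hinv (k - 1) (by omega), hinv (k - 2) (by omega), fibP_rec k hk]
    have e3 : (k : Int) + 1 = ((k + 1 : Nat) : Int) := by omega
    rw [e3]
    apply ih (k + 1) _ (by omega) (by omega) (by simpa using hlen)
    intro j hj
    rcases Nat.lt_or_ge j k with hlt | hge
    · rw [getD_set_ne' _ _ _ _ _ (by omega)]
      exact hinv j hlt
    · have hjk : j = k := by omega
      subst hjk
      exact getD_set_self' _ _ _ _ (by omega)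

lemma A_inner (fibs : List Int) (m r : Nat) : ∀ (t c : Nat) (g : List (List Int)) (w : Int),
    c + t = m → r < g.length → (g.getD r []).length = m →
    (PySem.List.pyRange (c : Int) (m : Int) 1).foldl
      (fun (s : List (List Int) × Int) cc =>
        (PySem.List.pySetD s.1 (r : Int)
          (PySem.List.pySetD (PySem.List.pyGetD s.1 (r : Int) []) cc (PySem.List.pyGetD fibs s.2 0)),
         s.2 + 1)) (g, w)
    = (g.set r ((g.getD r []).take c ++
        (List.range t).map (fun (j : Nat) => PySem.List.pyGetD fibs (w + (j : Int)) 0)), w + (t : Int)) := by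
  intro t
  induction t with
  | zero =>
    intro c g w hc hr hlen
    rw [PySem.List.pyRange_one_eq_nil (by omega)]
    simp only [List.foldl_nil, List.range_zero, List.map_nil, List.append_nil]
    rw [List.take_of_length_le (by omega), List.getD_eq_getElem _ [] hr,
        List.set_getElem_self (by simpa using hr)]
    simp
  | succ t ih =>
    intro c g w hc hr hlen
    set v := PySem.List.pyGetD fibs w 0 with hv
    rw [PySem.List.pyRange_one_cons (by omega), List.foldl_cons]
    simp only []
    have hinit : (PySem.List.pySetD g (r : Int)
        (PySem.List.pySetD (PySem.List.pyGetD g (r : Int) []) (c : Int) v), w + 1)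
        = (g.set r ((g.getD r []).set c v), w + 1) := by simp
    rw [hinit]
    have e3 : (c : Int) + 1 = ((c + 1 : Nat) : Int) := by push_cast; ring
    rw [e3]
    rw [ih (c + 1) _ (w + 1) (by omega) (by simpa using hr)
          (by rw [getD_set_self' _ _ _ _ (by omega)]; simpa using hlen)]
    rw [List.set_set, getD_set_self' _ _ _ _ (by omega)]
    have hrow : c < (g.getD r []).length := by omega
    have htake : ((g.getD r []).set c v).take (c + 1) = (g.getD r []).take c ++ [v] := by
      have hmin : min c (g[r]?.getD []).length = c :=
        Nat.min_eq_left (by simpa [List.getD] using le_of_lt hrow)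
      rw [List.set_eq_take_cons_drop v hrow]
      simp [List.take_append, List.length_take, List.take_take, hmin]
    rw [htake]
    congr 1
    · rw [List.append_assoc]
      congr 1
      simp [List.range_succ_eq_map, List.map_map]
      constructor
      · simp [hv]
      · intro a ha
        congr 1
        omega
    · push_cast
      ring


-- What A's grid loop leaves behind, row by row.
def gridFillA (fibs : List Int) (m : Nat) : Nat → Nat → List (List Int) → Int → List (List Int)
  | 0, _, g, _ => g
  | t + 1, a, g, w =>
    gridFillA fibs m t (a + 1)
      (g.set a ((List.range m).map (fun (j : Nat) => PySem.List.pyGetD fibs (w + (j : Int)) 0))) (w + (m : Int))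

lemma A_outer (fibs : List Int) (m : Nat) : ∀ (t a : Nat) (g : List (List Int)) (w : Int),
    a + t = m → g.length = m → (∀ j, j < m → (g.getD j []).length = m) →
    (PySem.List.pyRange (a : Int) (m : Int) 1).foldl
      (fun (s : List (List Int) × Int) rr =>
        (PySem.List.pyRange 0 (m : Int) 1).foldl
          (fun (u : List (List Int) × Int) cc =>
            (PySem.List.pySetD u.1 rr
              (PySem.List.pySetD (PySem.List.pyGetD u.1 rr []) cc (PySem.List.pyGetD fibs u.2 0)),
             u.2 + 1)) s) (g, w)
    = (gridFillA fibs m t a g w, w + ((t * m : Nat) : Int)) := by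
  intro t
  induction t with
  | zero =>
    intro a g w ha hg hrows
    rw [PySem.List.pyRange_one_eq_nil (a := (a : Int)) (b := (m : Int)) (by omega)]
    simp [gridFillA]
  | succ t ih =>
    intro a g w ha hg hrows
    rw [PySem.List.pyRange_one_cons (a := (a : Int)) (b := (m : Int)) (by omega), List.foldl_cons]
    have hA := A_inner fibs m a m 0 g w (by omega) (by omega) (hrows a (by omega))
    simp only [Nat.cast_zero] at hA
    rw [hA]
    simp only [List.take_zero, List.nil_append]
    have e3 : (a : Int) + 1 = ((a + 1 : Nat) : Int) := by push_cast; ring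
    have hrows' : ∀ j, j < m →
        (((g.set a ((List.range m).map (fun (j : Nat) => PySem.List.pyGetD fibs (w + (j : Int)) 0))).getD j []).length = m) := by
      intro j hj
      rcases eq_or_ne a j with hje | hne
      · subst hje
        rw [getD_set_self' _ _ _ _ (by omega)]
        simp
      · rw [getD_set_ne' _ _ _ _ _ hne]
        exact hrows j hj
    rw [e3, ih (a + 1) _ (w + (m : Int)) (by omega) (by simpa using hg) hrows']
    simp only [gridFillA]
    congr 1
    push_cast
    ring

lemma gridFillA_eq (fibs : List Int) (m : Nat) : ∀ (t a : Nat) (g : List (List Int)) (w : Int),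
    g.length = a + t →
    gridFillA fibs m t a g w
    = g.take a ++ (List.range t).map (fun (r : Nat) =>
        (List.range m).map (fun (j : Nat) => PySem.List.pyGetD fibs (w + ((r * m : Nat) : Int) + (j : Int)) 0)) := by
  intro t
  induction t with
  | zero =>
    intro a g w hg
    simp only [gridFillA, List.range_zero, List.map_nil, List.append_nil]
    rw [List.take_of_length_le (by omega)]
  | succ t ih =>
    intro a g w hg
    rw [gridFillA, ih (a + 1) _ (w + (m : Int)) (by simp only [List.length_set, hg]; omega)]
    have htake : (g.set a ((List.range m).map (fun (j : Nat) => PySem.List.pyGetD fibs (w + (j : Int)) 0))).take (a + 1)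
        = g.take a ++ [(List.range m).map (fun (j : Nat) => PySem.List.pyGetD fibs (w + (j : Int)) 0)] := by
      have ha : a < g.length := by omega
      have hmin : min a g.length = a := Nat.min_eq_left (le_of_lt ha)
      rw [List.set_eq_take_cons_drop _ ha]
      simp [List.take_append, List.length_take, List.take_take, hmin]
    rw [htake, List.append_assoc]
    congr 1
    simp [List.range_succ_eq_map, List.map_map]
    intro b hb j hj
    congr 1
    ring

-- B's inner loop: rolling pair (a, b) = (fibP k, fibP (k+1)) appends one Fibonacci number per step.
lemma B_inner : ∀ (l : List Int) (acc : List Int) (k : Nat),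
    l.foldl (fun (t : List Int × Int × Int) _ => (t.1 ++ [t.2.1], t.2.2, t.2.1 + t.2.2))
      (acc, fibP k, fibP (k + 1))
    = (acc ++ (List.range l.length).map (fun (j : Nat) => fibP (k + j)),
       fibP (k + l.length), fibP (k + l.length + 1)) := by
  intro l
  induction l with
  | nil => simp
  | cons x xs ih =>
    intro acc k
    simp only [List.foldl_cons]
    have hroll : fibP k + fibP (k + 1) = fibP (k + 2) := rfl
    rw [hroll]
    rw [show (acc ++ [fibP k], fibP (k + 1), fibP (k + 2))
          = (acc ++ [fibP k], fibP (k + 1), fibP ((k + 1) + 1)) from rfl]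
    rw [ih (acc ++ [fibP k]) (k + 1)]
    simp [List.range_succ_eq_map, List.map_map]
    refine ⟨fun j hj => ?_, ?_, ?_⟩ <;> (congr 1; omega)

-- B's outer loop: one row per step, the rolling pair advancing by R.length each row.
lemma B_outer (R : List Int) : ∀ (l : List Int) (acc : List (List Int)) (k : Nat),
    l.foldl (fun (s : List (List Int) × Int × Int) _ =>
        let t := R.foldl (fun (t : List Int × Int × Int) _ => (t.1 ++ [t.2.1], t.2.2, t.2.1 + t.2.2))
          (([] : List Int), s.2)
        (s.1 ++ [t.1], t.2)) (acc, fibP k, fibP (k + 1))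
    = (acc ++ (List.range l.length).map (fun (r : Nat) =>
        (List.range R.length).map (fun (j : Nat) => fibP (k + r * R.length + j))),
       fibP (k + l.length * R.length), fibP (k + l.length * R.length + 1)) := by
  intro l
  induction l with
  | nil => simp
  | cons x xs ih =>
    intro acc k
    simp only [List.foldl_cons]
    rw [B_inner R ([] : List Int) k]
    simp only [List.nil_append]
    rw [ih (acc ++ [(List.range R.length).map (fun (j : Nat) => fibP (k + j))]) (k + R.length)]
    simp [List.range_succ_eq_map, List.map_map, List.append_assoc]
    refine ⟨fun r hr j hj => ?_, ?_, ?_⟩ <;> (congr 1; ring)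

-- The common value of both programs.
def canonFib (m : Nat) : List (List Int) :=
  (List.range m).map (fun (r : Nat) => (List.range m).map (fun (j : Nat) => fibP (r * m + j)))

lemma A_eq (m : Nat) : print_matrix_of_fib (m : Int) = canonFib m := by
  unfold print_matrix_of_fib
  dsimp only
  simp only [← Nat.cast_mul, Int.toNat_natCast]
  have hL2 : 2 ≤ ([1, 1] ++ (List.replicate (m * m) (0 : Int)).drop 2).length := by simp
  have hinit : ∀ j, j < 2 → ([1, 1] ++ (List.replicate (m * m) (0 : Int)).drop 2).getD j 0 = fibP j := by
    intro j hj
    interval_cases j <;> rfl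
  have hf := fib_fill ([1, 1] ++ (List.replicate (m * m) (0 : Int)).drop 2).length
      (([1, 1] ++ (List.replicate (m * m) (0 : Int)).drop 2).length - 2) 2
      ([1, 1] ++ (List.replicate (m * m) (0 : Int)).drop 2) (by omega) (by omega) rfl hinit
  simp only [Nat.cast_ofNat] at hf
  rw [hf]
  have hg0len : ((PySem.List.pyRange 0 (m : Int) 1).map
      (fun _ => (PySem.List.pyRange 0 (m : Int) 1).map (fun _ => (0 : Int)))).length = m := by
    simp [PySem.List.length_pyRange_one]
  have hrows : ∀ j, j < m →
      ((((PySem.List.pyRange 0 (m : Int) 1).map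
        (fun _ => (PySem.List.pyRange 0 (m : Int) 1).map (fun _ => (0 : Int)))).getD j []).length = m) := by
    intro j hj
    rw [List.getD_eq_getElem _ [] (by omega), List.getElem_map]
    simp [PySem.List.length_pyRange_one]
  have hO := A_outer ((List.range ([1, 1] ++ (List.replicate (m * m) (0 : Int)).drop 2).length).map fibP)
      m m 0 ((PySem.List.pyRange 0 (m : Int) 1).map
        (fun _ => (PySem.List.pyRange 0 (m : Int) 1).map (fun _ => (0 : Int)))) 0
      (by omega) hg0len hrows
  simp only [Nat.cast_zero] at hO
  rw [hO]
  dsimp only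
  rw [gridFillA_eq _ _ m 0 _ 0 (by simp [PySem.List.length_pyRange_one])]
  simp only [List.take_zero, List.nil_append]
  unfold canonFib
  apply List.map_congr_left
  intro r hr
  apply List.map_congr_left
  intro j hj
  rw [List.mem_range] at hr hj
  have hidx : (0 : Int) + ((r * m : Nat) : Int) + (j : Int) = ((r * m + j : Nat) : Int) := by
    push_cast
    ring
  rw [hidx, PySem.List.pyGetD_natCast]
  have hlt : r * m + j < ([1, 1] ++ (List.replicate (m * m) (0 : Int)).drop 2).length := by
    have h1 : r * m + j < m * m := by nlinarith
    simp
    omega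
  exact PySem.List.getD_map_range fibP _ _ 0 hlt

lemma B_eq (m : Nat) : print_matrix_of_fib_alt (m : Int) = canonFib m := by
  unfold print_matrix_of_fib_alt
  dsimp only
  have h11 : ((([] : List (List Int)), (1 : Int), (1 : Int)) : List (List Int) × Int × Int)
      = (([] : List (List Int)), fibP 0, fibP (0 + 1)) := rfl
  rw [h11, B_outer]
  have hlen : (PySem.List.pyRange 0 (m : Int) 1).length = m := by
    simp [PySem.List.length_pyRange_one]
  rw [hlen]
  unfold canonFib
  simp only [List.nil_append]
  apply List.map_congr_left
  intro r hr
  apply List.map_congr_left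
  intro j hj
  congr 1
  omega

-- ===== VERDICT (by name: the statement is the Claim_ definition above) =====
theorem print_matrix_of_fib_spec : Claim_equal_print_matrix_of_fib := by
  intro num _
  unfold Spec_print_matrix_of_fib
  rcases Int.lt_or_le num 0 with hneg | hpos
  · simp [print_matrix_of_fib, print_matrix_of_fib_alt,
      PySem.List.pyRange_one_eq_nil (by omega : num ≤ (0 : Int))]
  · have h : num = ((num.toNat : Nat) : Int) := (Int.toNat_of_nonneg hpos).symm
    rw [h, A_eq, B_eq]
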